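-- pv_equiv track=rewrite | github.com/RuanVitorr/atividades-de-Computabilidade-e-Complexidade-de-Algortimos | att04.py | valida_string_com_zero
-- ===== SOURCE A (Python) =====
-- def valida_string_com_zero(palavra):
--     estado = 'q0'
--
--     for char in palavra:
--         if estado == 'q0':
--             if char == '0':
--                 estado = 'q1'
--             elif char == '1':
--                 estado = 'q0'
--             else:
--                 return 'palavra invalida'
--         elif estado == 'q1':
--             if char == '0' or char == '1':
--                 estado = 'q1'
--             else:
--                 return 'palavra invalida'
--
--     if estado == 'q1':
--         return "palavra valida (contém pelo menos um '0')"
--     else: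
--         return "palavra invalida (não contém nenhum '0')"
-- ===== SOURCE B (Python) =====
-- def valida_string_com_zero(palavra):
--     if all(c in {'0', '1'} for c in palavra):
--         if '0' in palavra:
--             return "palavra valida (contém pelo menos um '0')"
--         return "palavra invalida (não contém nenhum '0')"
--     return 'palavra invalida'
-- ===== Notes on version B (the rewrite author's own statement) =====
-- stated objective: simpler
-- what changed: Replaced the explicit DFA state machine with two independent predicate passes: an all-characters-binary validity check followed by a zero-membership check.
import Mathlib
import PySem

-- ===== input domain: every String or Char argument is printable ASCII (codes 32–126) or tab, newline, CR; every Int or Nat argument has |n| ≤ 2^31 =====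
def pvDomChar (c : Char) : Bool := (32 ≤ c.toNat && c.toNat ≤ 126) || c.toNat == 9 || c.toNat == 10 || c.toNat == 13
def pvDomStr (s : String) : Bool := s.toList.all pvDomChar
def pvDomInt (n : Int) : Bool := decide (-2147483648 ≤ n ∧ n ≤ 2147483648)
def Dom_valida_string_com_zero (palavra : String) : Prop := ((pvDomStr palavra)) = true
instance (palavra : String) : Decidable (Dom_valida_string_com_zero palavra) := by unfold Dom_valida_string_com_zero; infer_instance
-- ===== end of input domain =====

-- B replaces A's DFA scan by two independent predicate passes (all-binary check, then '0' membership); objective: simpler.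

-- ===== PORT A =====
-- the DFA loop of A: state is the Python string 'q0'/'q1'
def pvALoop : List Char → String → String
  | [], estado =>
    if estado == "q1" then "palavra valida (contém pelo menos um '0')"
    else "palavra invalida (não contém nenhum '0')"
  | c :: rest, estado =>
    if estado == "q0" then
      if c == '0' then pvALoop rest "q1"
      else if c == '1' then pvALoop rest "q0"
      else "palavra invalida"
    else if estado == "q1" then
      if c == '0' || c == '1' then pvALoop rest "q1"
      else "palavra invalida"
    else pvALoop rest estado

def valida_string_com_zero (palavra : String) : String :=
  pvALoop palavra.toList "q0"

-- ===== PORT B =====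
def valida_string_com_zero_alt (palavra : String) : String :=
  if palavra.toList.all (fun c => c == '0' || c == '1') then
    if palavra.toList.any (fun c => c == '0') then
      "palavra valida (contém pelo menos um '0')"
    else "palavra invalida (não contém nenhum '0')"
  else "palavra invalida"

-- ===== PRECONDITION & SPEC =====
def Spec_valida_string_com_zero (palavra : String) (out : String) : Prop := out = valida_string_com_zero_alt palavra
instance (palavra : String) (out : String) : Decidable (Spec_valida_string_com_zero palavra out) := by unfold Spec_valida_string_com_zero; infer_instance

-- ===== CLAIM (what is proved, stated in full; the proofs are below) =====
def Claim_equal_valida_string_com_zero : Prop := ∀ (palavra : String), Dom_valida_string_com_zero palavra → Spec_valida_string_com_zero palavra (valida_string_com_zero palavra)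

-- ===== LEMMAS AND PROOFS =====
theorem pvALoop_q1 (cs : List Char) :
    pvALoop cs "q1" =
      if cs.all (fun c => c == '0' || c == '1') then "palavra valida (contém pelo menos um '0')"
      else "palavra invalida" := by
  induction cs with
  | nil => simp [pvALoop]
  | cons c rest ih =>
    simp only [pvALoop, List.all_cons]
    by_cases h0 : c = '0' <;> by_cases h1 : c = '1' <;> simp [h0, h1, ih]

theorem pvALoop_q0 (cs : List Char) :
    pvALoop cs "q0" =
      if cs.all (fun c => c == '0' || c == '1') then
        if cs.any (fun c => c == '0') then "palavra valida (contém pelo menos um '0')"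
        else "palavra invalida (não contém nenhum '0')"
      else "palavra invalida" := by
  induction cs with
  | nil => simp [pvALoop]
  | cons c rest ih =>
    simp only [pvALoop, List.all_cons, List.any_cons]
    by_cases h0 : c = '0' <;> by_cases h1 : c = '1' <;>
      simp [h0, h1, ih, pvALoop_q1]

-- ===== VERDICT (by name: the statement is the Claim_ definition above) =====
theorem valida_string_com_zero_spec : Claim_equal_valida_string_com_zero := by
  intro palavra _
  unfold Spec_valida_string_com_zero valida_string_com_zero valida_string_com_zero_alt
  exact pvALoop_q0 palavra.toList
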